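-- pv_equiv track=rewrite | github.com/isabella0428/RegCard | baseline_comparison.py | _constraint_graph_components
-- ===== SOURCE A (Python) =====
-- def _constraint_graph_components(constraint_pairs, n_nodes):
--     """
--     Build directed graph from (left, right): left >= right => edge left -> right.
--     Return list of connected components (each component = list of nodes in one chain).
--     """
--     pairs = [(int(left), int(right)) for left, right in constraint_pairs if 0 <= int(left) < n_nodes and 0 <= int(right) < n_nodes]
--     out_edges = {}
--     in_degree = {}
--     for left, right in pairs:
--         out_edges.setdefault(left, []).append(right)
--         in_degree[right] = in_degree.get(right, 0) + 1
--         in_degree.setdefault(left, 0)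
--     # Undirected graph for connected components (same chain)
--     undir = {}
--     for left, right in pairs:
--         undir.setdefault(left, set()).add(right)
--         undir.setdefault(right, set()).add(left)
--     visited = set()
--     components = []
--     for start in range(n_nodes):
--         if start in visited:
--             continue
--         stack = [start]
--         comp = set()
--         while stack:
--             u = stack.pop()
--             if u in visited:
--                 continue
--             visited.add(u)
--             comp.add(u)
--             for v in undir.get(u, []):
--                 if v not in visited:
--                     stack.append(v)
--         if comp:
--             components.append(comp)
--     return components, out_edges, in_degree
-- ===== SOURCE B (Python) =====
-- def _constraint_graph_components(constraint_pairs, n_nodes):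
--     """
--     Same interface as A: filter pairs, build out_edges / in_degree in one pass,
--     but find connected components by fixpoint saturation over the edge list
--     (no adjacency dict, no DFS stack): grow the component of each uncovered
--     start node until it stops changing.
--     """
--     pairs = [(int(left), int(right)) for left, right in constraint_pairs if 0 <= int(left) < n_nodes and 0 <= int(right) < n_nodes]
--     out_edges = {}
--     in_degree = {}
--     for left, right in pairs:
--         out_edges.setdefault(left, []).append(right)
--         in_degree[right] = in_degree.get(right, 0) + 1
--         in_degree.setdefault(left, 0)
--     components = []
--     covered = set()
--     for start in range(n_nodes):
--         if start in covered:
--             continue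
--         comp = {start}
--         for _ in range(n_nodes):
--             grown = comp | {r for l, r in pairs if l in comp} | {l for l, r in pairs if r in comp}
--             if grown == comp:
--                 break
--             comp = grown
--         components.append(comp)
--         covered |= comp
--     return components, out_edges, in_degree
-- ===== Notes on version B (the rewrite author's own statement) =====
-- stated objective: alternative
-- what changed: Component discovery no longer builds an undirected adjacency dict and runs a visited-set stack DFS; instead each uncovered start node's component is grown by fixpoint saturation directly over the filtered edge list until it stops changing, while the out_edges/in_degree single pass is kept as in A.
import Mathlib
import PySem

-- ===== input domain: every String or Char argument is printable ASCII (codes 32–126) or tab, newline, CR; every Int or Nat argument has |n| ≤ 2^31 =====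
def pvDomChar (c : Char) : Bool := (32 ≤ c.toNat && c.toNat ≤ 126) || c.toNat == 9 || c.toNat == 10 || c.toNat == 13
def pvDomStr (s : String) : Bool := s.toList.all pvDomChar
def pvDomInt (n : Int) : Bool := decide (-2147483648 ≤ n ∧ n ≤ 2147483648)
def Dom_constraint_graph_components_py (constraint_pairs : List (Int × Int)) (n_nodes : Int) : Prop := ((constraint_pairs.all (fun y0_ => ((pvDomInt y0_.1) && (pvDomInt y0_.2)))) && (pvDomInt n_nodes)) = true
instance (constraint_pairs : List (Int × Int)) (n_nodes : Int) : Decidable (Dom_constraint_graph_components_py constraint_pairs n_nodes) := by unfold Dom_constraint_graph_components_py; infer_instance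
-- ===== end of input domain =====

-- B replaces A's adjacency-dict + stack DFS component search by fixpoint saturation over the
-- filtered edge list (grow each uncovered start's component until it stops changing);
-- objective: alternative algorithm, same return value.  The Python functions return each
-- component as a Python set (iteration order unmodelled); both ports encode that unordered
-- value by its sorted element list.

-- ===== PORT A =====
-- shared helper (these Python lines are identical in A and in B): the filtered pair list
def pvValidPairs (cp : List (Int × Int)) (n : Int) : List (Int × Int) :=
  cp.filter (fun p => decide (0 ≤ p.1 ∧ p.1 < n ∧ 0 ≤ p.2 ∧ p.2 < n))

-- shared helper (identical Python lines in A and in B): the out_edges / in_degree pass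
def pvEdgeDicts (pairs : List (Int × Int)) :
    PySem.Dict Int (List Int) × PySem.Dict Int Int :=
  pairs.foldl
    (fun st p =>
      (st.1.modify p.1 [] (fun l => l ++ [p.2]),
       (st.2.insert p.2 (st.2.getD p.2 0 + 1)).setdefault p.1 0))
    (PySem.Dict.empty, PySem.Dict.empty)

-- A's undirected adjacency dict: undir.setdefault(left,set()).add(right) etc.
def pvUndir (pairs : List (Int × Int)) : PySem.Dict Int (PySem.Set Int) :=
  pairs.foldl
    (fun u p =>
      (u.modify p.1 [] (fun s => PySem.Set.add s p.2)).modify p.2 []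
        (fun s => PySem.Set.add s p.1))
    PySem.Dict.empty

-- membership in the undirected adjacency dict (cited by pvUndir_range, which port A needs)
lemma pvUndir_aux (pairs : List (Int × Int)) (d : PySem.Dict Int (PySem.Set Int)) (u v : Int) :
    v ∈ (pairs.foldl
      (fun u p =>
        (u.modify p.1 [] (fun s => PySem.Set.add s p.2)).modify p.2 []
          (fun s => PySem.Set.add s p.1)) d).getD u [] ↔
      v ∈ d.getD u [] ∨ (u, v) ∈ pairs ∨ (v, u) ∈ pairs := by
  induction pairs generalizing d with
  | nil => simp
  | cons p ps ih =>
    simp only [List.foldl_cons, ih, List.mem_cons]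
    rw [PySem.Dict.getD_modify, PySem.Dict.getD_modify]
    by_cases h1 : u = p.2 <;> by_cases h2 : u = p.1 <;> by_cases h3 : p.2 = p.1 <;>
      first
      | (simp [h1, h2, h3, Ne.symm h3, PySem.Dict.getD_modify, PySem.Set.mem_add,
          Prod.ext_iff] <;> tauto)
      | (simp [h1, h2, h3, PySem.Dict.getD_modify, PySem.Set.mem_add, Prod.ext_iff] <;> tauto)

lemma pvUndir_mem (pairs : List (Int × Int)) (u v : Int) :
    v ∈ (pvUndir pairs).getD u [] ↔ (u, v) ∈ pairs ∨ (v, u) ∈ pairs := by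
  rw [pvUndir]
  rw [pvUndir_aux pairs PySem.Dict.empty u v]
  simp

lemma pvValidPairs_range (cp : List (Int × Int)) (n : Int) :
    ∀ p ∈ pvValidPairs cp n, (0 ≤ p.1 ∧ p.1 < n) ∧ (0 ≤ p.2 ∧ p.2 < n) := by
  intro p hp
  have := (List.mem_filter.mp hp).2
  simp only [decide_eq_true_eq] at this
  exact ⟨⟨this.1, this.2.1⟩, ⟨this.2.2.1, this.2.2.2⟩⟩

-- cited by port A as the range hypothesis of the DFS loop
lemma pvUndir_range (cp : List (Int × Int)) (n : Int) :
    ∀ k x, x ∈ (pvUndir (pvValidPairs cp n)).getD k [] → 0 ≤ x ∧ x < n := by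
  intro k x hx
  rcases (pvUndir_mem _ k x).mp hx with h | h
  · exact (pvValidPairs_range cp n _ h).2
  · exact (pvValidPairs_range cp n _ h).1

-- a duplicate-free list of ints in [0, n) has at most n.toNat elements (termination of the DFS)
lemma pvLen_le (l : List Int) (n : Int) (hnd : l.Nodup) (hr : ∀ x ∈ l, 0 ≤ x ∧ x < n) :
    l.length ≤ n.toNat := by
  classical
  have h1 : l.toFinset.card = l.length := List.toFinset_card_of_nodup hnd
  have h2 : l.toFinset ⊆ Finset.Ico (0 : Int) n := by
    intro x hx
    rcases hr x (List.mem_toFinset.mp hx) with ⟨h, h'⟩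
    exact Finset.mem_Ico.mpr ⟨h, h'⟩
  have := Finset.card_le_card h2
  simpa [h1, Int.card_Ico] using this

-- A's inner DFS: while stack: u = stack.pop(); if u in visited: continue; visit u; push
-- unvisited neighbours.  The subtype result carries the invariant the recursion needs.
def pvDfs (n : Int) (undir : PySem.Dict Int (PySem.Set Int))
    (hu : ∀ k x, x ∈ undir.getD k [] → 0 ≤ x ∧ x < n)
    (stack : List Int) (visited comp : PySem.Set Int)
    (hs : ∀ x ∈ stack, 0 ≤ x ∧ x < n)
    (hv : visited.Nodup ∧ ∀ x ∈ visited, 0 ≤ x ∧ x < n) :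
    { r : PySem.Set Int × PySem.Set Int // r.1.Nodup ∧ ∀ x ∈ r.1, 0 ≤ x ∧ x < n } :=
  match stack with
  | [] => ⟨(visited, comp), hv⟩
  | q :: qs =>
    let u := (q :: qs).getLast (by simp)
    let rest := (q :: qs).dropLast
    if hvis : PySem.Set.contains visited u then
      pvDfs n undir hu rest visited comp
        (fun x hx => hs x ((List.dropLast_sublist _).subset hx)) hv
    else
      let visited' := PySem.Set.add visited u
      let comp' := PySem.Set.add comp u
      let pushes := (undir.getD u []).filter (fun v => !(PySem.Set.contains visited' v))
      pvDfs n undir hu (rest ++ pushes) visited' comp'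
        (by
          intro x hx
          rcases List.mem_append.mp hx with h | h
          · exact hs x ((List.dropLast_sublist _).subset h)
          · exact hu u x (List.mem_of_mem_filter h))
        (by
          refine ⟨PySem.Set.nodup_add _ _ hv.1, ?_⟩
          intro x hx
          rcases (PySem.Set.mem_add _ _ _).mp hx with h | h
          · exact hv.2 x h
          · exact h ▸ hs u (List.getLast_mem (by simp)))
  termination_by ((n.toNat + 1) - visited.length, stack.length)
  decreasing_by
  · exact Prod.Lex.right _ (by simp [rest])
  · have hle : visited.length ≤ n.toNat := pvLen_le visited n hv.1 hv.2
    have hmem : ¬ ((q :: qs).getLast (by simp) ∈ visited) := by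
      simpa [PySem.Set.contains_iff] using hvis
    exact Prod.Lex.left _ _ (by simp [PySem.Set.add, hmem]; omega)

-- cited by pvOuterA: the seed stack [s] lies inside [0, n)
lemma pvSingletonRange (n s : Int) (h : 0 ≤ s ∧ s < n) : ∀ x ∈ [s], 0 ≤ x ∧ x < n := by
  intro x hx; simp at hx; exact hx ▸ h

-- A's outer loop over range(n_nodes) with the global visited set
def pvOuterA (n : Int) (undir : PySem.Dict Int (PySem.Set Int))
    (hu : ∀ k x, x ∈ undir.getD k [] → 0 ≤ x ∧ x < n)
    (starts : List Int) (hst : ∀ s ∈ starts, 0 ≤ s ∧ s < n)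
    (visited : PySem.Set Int)
    (hv : visited.Nodup ∧ ∀ x ∈ visited, 0 ≤ x ∧ x < n)
    (comps : List (List Int)) : List (List Int) :=
  match starts with
  | [] => comps
  | s :: ss =>
    if PySem.Set.contains visited s then
      pvOuterA n undir hu ss (fun x hx => hst x (List.mem_cons_of_mem _ hx)) visited hv comps
    else
      let r := pvDfs n undir hu [s] visited PySem.Set.empty
        (pvSingletonRange n s (hst s List.mem_cons_self)) hv
      -- Python appends the set `comp` if nonempty; the set is encoded by its sorted list
      pvOuterA n undir hu ss (fun x hx => hst x (List.mem_cons_of_mem _ hx)) r.val.1 r.property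
        (if r.val.2 = [] then comps
         else comps ++ [PySem.List.sorted r.val.2 (fun x => x)])

def constraint_graph_components_py (constraint_pairs : List (Int × Int)) (n_nodes : Int) :
    List (List Int) × (List (Int × List Int)) × (List (Int × Int)) :=
  let pairs := pvValidPairs constraint_pairs n_nodes
  let ds := pvEdgeDicts pairs
  let comps := pvOuterA n_nodes (pvUndir pairs) (pvUndir_range constraint_pairs n_nodes)
    (PySem.List.pyRange 0 n_nodes 1)
    (fun s hs => PySem.List.mem_pyRange_one.mp hs)
    PySem.Set.empty (by constructor <;> simp [PySem.Set.empty]) []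
  (comps, ds.1.items, ds.2.items)

-- ===== PORT B =====
-- one saturation step: comp | {r for (l,r) in pairs if l in comp} | {l for (l,r) in pairs if r in comp}
def pvGrow (pairs : List (Int × Int)) (comp : PySem.Set Int) : PySem.Set Int :=
  PySem.Set.union
    (PySem.Set.union comp
      (PySem.Set.ofList ((pairs.filter (fun p => PySem.Set.contains comp p.1)).map (fun p => p.2))))
    (PySem.Set.ofList ((pairs.filter (fun p => PySem.Set.contains comp p.2)).map (fun p => p.1)))

-- for _ in range(n_nodes): grown = grow(comp); if grown == comp: break; comp = grown
def pvSaturate (pairs : List (Int × Int)) (fuel : List Int) (comp : PySem.Set Int) :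
    PySem.Set Int :=
  match fuel with
  | [] => comp
  | _ :: rest =>
    let grown := pvGrow pairs comp
    if PySem.Set.equal grown comp then comp else pvSaturate pairs rest grown

-- B's outer loop: covered nodes are skipped; each new component is saturated from {start}
def pvOuterB (pairs : List (Int × Int)) (n : Int) (starts : List Int)
    (covered : PySem.Set Int) (comps : List (List Int)) : List (List Int) :=
  match starts with
  | [] => comps
  | s :: ss =>
    if PySem.Set.contains covered s then pvOuterB pairs n ss covered comps
    else
      let comp := pvSaturate pairs (PySem.List.pyRange 0 n 1) (PySem.Set.ofList [s])
      -- Python appends the set `comp`; the set is encoded by its sorted list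
      pvOuterB pairs n ss (PySem.Set.union covered comp)
        (comps ++ [PySem.List.sorted comp (fun x => x)])

def constraint_graph_components_py_alt (constraint_pairs : List (Int × Int)) (n_nodes : Int) :
    List (List Int) × (List (Int × List Int)) × (List (Int × Int)) :=
  let pairs := pvValidPairs constraint_pairs n_nodes
  let ds := pvEdgeDicts pairs
  (pvOuterB pairs n_nodes (PySem.List.pyRange 0 n_nodes 1) PySem.Set.empty [],
   ds.1.items, ds.2.items)

-- ===== PRECONDITION & SPEC =====
def Spec_constraint_graph_components_py (constraint_pairs : List (Int × Int)) (n_nodes : Int) (out : List (List Int) × (List (Int × List Int)) × (List (Int × Int))) : Prop := out = constraint_graph_components_py_alt constraint_pairs n_nodes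
instance (constraint_pairs : List (Int × Int)) (n_nodes : Int) (out : List (List Int) × (List (Int × List Int)) × (List (Int × Int))) : Decidable (Spec_constraint_graph_components_py constraint_pairs n_nodes out) := by unfold Spec_constraint_graph_components_py; infer_instance

-- ===== CLAIM (what is proved, stated in full; the proofs are below) =====
def Claim_equal_constraint_graph_components_py : Prop := ∀ (constraint_pairs : List (Int × Int)) (n_nodes : Int), Dom_constraint_graph_components_py constraint_pairs n_nodes → Spec_constraint_graph_components_py constraint_pairs n_nodes (constraint_graph_components_py constraint_pairs n_nodes)

-- ===== LEMMAS AND PROOFS =====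

-- the undirected reachability relation generated by the filtered pairs
def pvAdj (pairs : List (Int × Int)) (u v : Int) : Prop := (u, v) ∈ pairs ∨ (v, u) ∈ pairs
def pvConn (pairs : List (Int × Int)) : Int → Int → Prop := Relation.ReflTransGen (pvAdj pairs)

lemma pvAdj_symm (pairs : List (Int × Int)) {u v : Int} (h : pvAdj pairs u v) : pvAdj pairs v u := h.symm

-- ===== DFS side =====
lemma pvDfs_spec (n : Int) (pairs : List (Int × Int))
    (undir : PySem.Dict Int (PySem.Set Int))
    (hU : ∀ u v, v ∈ undir.getD u [] ↔ pvAdj pairs u v)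
    (hu : ∀ k x, x ∈ undir.getD k [] → 0 ≤ x ∧ x < n)
    (start : Int) (visited₀ : PySem.Set Int) :
    ∀ (stack : List Int) (visited comp : PySem.Set Int)
      (hs : ∀ x ∈ stack, 0 ≤ x ∧ x < n)
      (hv : visited.Nodup ∧ ∀ x ∈ visited, 0 ≤ x ∧ x < n),
      (∀ x, x ∈ visited ↔ x ∈ visited₀ ∨ x ∈ comp) →
      comp.Nodup →
      (∀ x ∈ stack, pvConn pairs start x) →
      (∀ x ∈ stack, x ∉ visited₀) →
      (∀ x ∈ comp, pvConn pairs start x) →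
      (∀ x ∈ comp, x ∉ visited₀) →
      (∀ u ∈ comp, ∀ v, pvAdj pairs u v → v ∈ visited ∨ v ∈ stack) →
      (∀ x, x ∈ (pvDfs n undir hu stack visited comp hs hv).val.1 ↔
          x ∈ visited₀ ∨ x ∈ (pvDfs n undir hu stack visited comp hs hv).val.2) ∧
      (pvDfs n undir hu stack visited comp hs hv).val.2.Nodup ∧
      (∀ x ∈ (pvDfs n undir hu stack visited comp hs hv).val.2,
          pvConn pairs start x ∧ x ∉ visited₀) ∧
      (∀ u ∈ (pvDfs n undir hu stack visited comp hs hv).val.2, ∀ v, pvAdj pairs u v →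
          v ∈ (pvDfs n undir hu stack visited comp hs hv).val.1) ∧
      (∀ x ∈ comp, x ∈ (pvDfs n undir hu stack visited comp hs hv).val.2) ∧
      (∀ x ∈ stack, x ∈ (pvDfs n undir hu stack visited comp hs hv).val.1) ∧
      (∀ x ∈ visited, x ∈ (pvDfs n undir hu stack visited comp hs hv).val.1) := by
  intro stack visited comp hs hv
  fun_induction pvDfs n undir hu stack visited comp hs hv with
  | case1 visited comp hv hs1 hs2 =>
    intro hsplit hcnd _ _ hcr hcn hcl
    refine ⟨hsplit, hcnd, fun x hx => ⟨hcr x hx, hcn x hx⟩, ?_, fun x hx => hx, ?_, fun x hx => hx⟩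
    · intro w hw v hadj
      rcases hcl w hw v hadj with h | h
      · exact h
      · simp at h
    · intro x hx; simp at hx
  | case2 visited comp hv q qs hs1 u rest hvis hs2 ih =>
    intro hsplit hcnd hstr hstn hcr hcn hcl
    have hstk : rest ++ [u] = q :: qs := List.dropLast_append_getLast (by simp)
    have hmem : ∀ x : Int, x ∈ q :: qs ↔ x ∈ rest ∨ x = u := by
      intro x; rw [← hstk]; simp
    have huv : u ∈ visited := (PySem.Set.contains_iff _ _).mp hvis
    obtain ⟨C1, C2, C3, C4, C5, C6, C7⟩ := ih hsplit hcnd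
      (fun x hx => hstr x ((hmem x).mpr (Or.inl hx)))
      (fun x hx => hstn x ((hmem x).mpr (Or.inl hx)))
      hcr hcn
      (by
        intro w hw v hadj
        rcases hcl w hw v hadj with h | h
        · exact Or.inl h
        · rcases (hmem v).mp h with h' | h'
          · exact Or.inr h'
          · exact Or.inl (h' ▸ huv))
    refine ⟨C1, C2, C3, C4, C5, ?_, C7⟩
    intro x hx
    rcases (hmem x).mp hx with h | h
    · exact C6 x h
    · exact C7 x (h ▸ huv)
  | case3 visited comp hv q qs hs1 u rest hvis visited' comp' pushes hs2 ih =>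
    intro hsplit hcnd hstr hstn hcr hcn hcl
    have hstk : rest ++ [u] = q :: qs := List.dropLast_append_getLast (by simp)
    have hmem : ∀ x : Int, x ∈ q :: qs ↔ x ∈ rest ∨ x = u := by
      intro x; rw [← hstk]; simp
    have humem : u ∈ q :: qs := (hmem u).mpr (Or.inr rfl)
    have hunv : u ∉ visited := fun h => hvis ((PySem.Set.contains_iff _ _).mpr h)
    have hun0 : u ∉ visited₀ := fun h => hunv ((hsplit u).mpr (Or.inl h))
    have hpush : ∀ x, x ∈ pushes → x ∈ undir.getD u [] ∧ x ∉ visited' := by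
      intro x hx
      have h := List.mem_filter.mp hx
      refine ⟨h.1, fun hxv => ?_⟩
      have h2 := h.2
      simp only [Bool.not_eq_true', ← Bool.not_eq_true] at h2
      exact h2 ((PySem.Set.contains_iff _ _).mpr hxv)
    obtain ⟨C1, C2, C3, C4, C5, C6, C7⟩ := ih
      (by
        intro x
        constructor
        · intro hx
          rcases (PySem.Set.mem_add _ _ _).mp hx with h | h
          · rcases (hsplit x).mp h with h' | h'
            · exact Or.inl h'
            · exact Or.inr ((PySem.Set.mem_add _ _ _).mpr (Or.inl h'))
          · exact Or.inr ((PySem.Set.mem_add _ _ _).mpr (Or.inr h))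
        · intro hx
          rcases hx with h | h
          · exact (PySem.Set.mem_add _ _ _).mpr (Or.inl ((hsplit x).mpr (Or.inl h)))
          · rcases (PySem.Set.mem_add _ _ _).mp h with h' | h'
            · exact (PySem.Set.mem_add _ _ _).mpr (Or.inl ((hsplit x).mpr (Or.inr h')))
            · exact (PySem.Set.mem_add _ _ _).mpr (Or.inr h'))
      (PySem.Set.nodup_add _ _ hcnd)
      (by
        intro x hx
        rcases List.mem_append.mp hx with h | h
        · exact hstr x ((hmem x).mpr (Or.inl h))
        · exact Relation.ReflTransGen.tail (hstr u humem) ((hU u x).mp (hpush x h).1))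
      (by
        intro x hx
        rcases List.mem_append.mp hx with h | h
        · exact hstn x ((hmem x).mpr (Or.inl h))
        · intro h0
          exact (hpush x h).2 ((PySem.Set.mem_add _ _ _).mpr
            (Or.inl ((hsplit x).mpr (Or.inl h0)))))
      (by
        intro x hx
        rcases (PySem.Set.mem_add _ _ _).mp hx with h | h
        · exact hcr x h
        · exact h ▸ hstr u humem)
      (by
        intro x hx
        rcases (PySem.Set.mem_add _ _ _).mp hx with h | h
        · exact hcn x h
        · exact h ▸ hun0)
      (by
        intro w hw v hadj
        rcases (PySem.Set.mem_add _ _ _).mp hw with h | h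
        · rcases hcl w h v hadj with h1 | h2
          · exact Or.inl ((PySem.Set.mem_add _ _ _).mpr (Or.inl h1))
          · rcases (hmem v).mp h2 with h' | h'
            · exact Or.inr (List.mem_append.mpr (Or.inl h'))
            · exact Or.inl ((PySem.Set.mem_add _ _ _).mpr (Or.inr h'))
        · have hvU : v ∈ undir.getD u [] := (hU u v).mpr (h ▸ hadj)
          by_cases hvv : v ∈ visited'
          · exact Or.inl hvv
          · refine Or.inr (List.mem_append.mpr (Or.inr (List.mem_filter.mpr ⟨hvU, ?_⟩)))
            simp only [Bool.not_eq_true']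
            rw [← Bool.not_eq_true]
            intro hc
            exact hvv ((PySem.Set.contains_iff _ _).mp hc))
    refine ⟨C1, C2, C3, C4, ?_, ?_, ?_⟩
    · intro x hx; exact C5 x ((PySem.Set.mem_add _ _ _).mpr (Or.inl hx))
    · intro x hx
      rcases (hmem x).mp hx with h | h
      · exact C6 x (List.mem_append.mpr (Or.inl h))
      · exact h ▸ C7 u ((PySem.Set.mem_add _ _ _).mpr (Or.inr rfl))
    · intro x hx; exact C7 x ((PySem.Set.mem_add _ _ _).mpr (Or.inl hx))

-- the DFS from an unvisited start, with visited closed under adjacency, collects exactly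
-- the connected component of start
lemma pvDfs_component (n : Int) (pairs : List (Int × Int))
    (undir : PySem.Dict Int (PySem.Set Int))
    (hU : ∀ u v, v ∈ undir.getD u [] ↔ pvAdj pairs u v)
    (hu : ∀ k x, x ∈ undir.getD k [] → 0 ≤ x ∧ x < n)
    (start : Int) (visited : PySem.Set Int)
    (hv : visited.Nodup ∧ ∀ x ∈ visited, 0 ≤ x ∧ x < n)
    (hnotin : start ∉ visited)
    (hclosed : ∀ u v, u ∈ visited → pvAdj pairs u v → v ∈ visited)
    (hs : ∀ x ∈ [start], 0 ≤ x ∧ x < n) :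
    (∀ x, x ∈ (pvDfs n undir hu [start] visited PySem.Set.empty hs hv).val.2 ↔
        pvConn pairs start x) ∧
    (pvDfs n undir hu [start] visited PySem.Set.empty hs hv).val.2.Nodup ∧
    (∀ x, x ∈ (pvDfs n undir hu [start] visited PySem.Set.empty hs hv).val.1 ↔
        x ∈ visited ∨ x ∈ (pvDfs n undir hu [start] visited PySem.Set.empty hs hv).val.2) := by
  obtain ⟨C1, C2, C3, C4, C5, C6, C7⟩ :=
    pvDfs_spec n pairs undir hU hu start visited [start] visited PySem.Set.empty hs hv
      (by intro x; simp [PySem.Set.empty])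
      (by simp [PySem.Set.empty])
      (by intro x hx; simp at hx; exact hx ▸ Relation.ReflTransGen.refl)
      (by intro x hx; simp at hx; exact hx ▸ hnotin)
      (by intro x hx; simp [PySem.Set.empty] at hx)
      (by intro x hx; simp [PySem.Set.empty] at hx)
      (by intro w hw; simp [PySem.Set.empty] at hw)
  have hstartr : start ∈ (pvDfs n undir hu [start] visited PySem.Set.empty hs hv).val.2 := by
    have h1 := C6 start (by simp)
    rcases (C1 start).mp h1 with h | h
    · exact absurd h hnotin
    · exact h
  refine ⟨?_, C2, C1⟩
  intro x
  constructor
  · exact fun hx => (C3 x hx).1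
  · intro hconn
    induction hconn with
    | refl => exact hstartr
    | @tail b c _ hbc ih =>
      have hc1 := C4 b ih c hbc
      rcases (C1 c).mp hc1 with h | h
      · exfalso
        have hb : b ∈ visited := hclosed c b h (pvAdj_symm pairs hbc)
        exact (C3 b ih).2 hb
      · exact h

-- ===== saturation side =====
lemma pvGrow_mem (pairs : List (Int × Int)) (c : PySem.Set Int) (x : Int) :
    x ∈ pvGrow pairs c ↔
      x ∈ c ∨ ∃ p ∈ pairs, (p.1 ∈ c ∧ x = p.2) ∨ (p.2 ∈ c ∧ x = p.1) := by
  constructor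
  · simp only [pvGrow, PySem.Set.mem_union, PySem.Set.mem_ofList, List.mem_map,
      List.mem_filter, PySem.Set.contains_iff]
    aesop
  · simp only [pvGrow, PySem.Set.mem_union, PySem.Set.mem_ofList, List.mem_map,
      List.mem_filter, PySem.Set.contains_iff]
    aesop

lemma pvGrow_nodup (pairs : List (Int × Int)) (c : PySem.Set Int) (h : c.Nodup) :
    (pvGrow pairs c).Nodup :=
  PySem.Set.nodup_union _ _ (PySem.Set.nodup_union _ _ h)

lemma pvGrow_sub (pairs : List (Int × Int)) (c : PySem.Set Int) :
    ∀ x ∈ c, x ∈ pvGrow pairs c := by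
  intro x hx; exact (pvGrow_mem pairs c x).mpr (Or.inl hx)

lemma pvGrow_len (pairs : List (Int × Int)) (c : PySem.Set Int)
    (hne : ¬ PySem.Set.equal (pvGrow pairs c) c = true) :
    c.length + 1 ≤ (pvGrow pairs c).length := by
  have hsub := pvGrow_sub pairs c
  have hex : ∃ x ∈ pvGrow pairs c, x ∉ c := by
    by_contra hall
    push Not at hall
    exact hne ((PySem.Set.equal_iff _ _).mpr (fun x => ⟨fun h => hall x h, fun h => hsub x h⟩))
  obtain ⟨x, hxg, hxc⟩ := hex
  have hu : ∀ (s : PySem.Set Int) (t : List Int), PySem.Set.union s t =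
      s ++ List.filter (fun y => !(PySem.Set.contains s y)) (PySem.Set.ofList t) :=
    fun s t => PySem.Set.update_eq_append_filter s t
  rw [pvGrow, hu, hu] at hxg ⊢
  rw [List.append_assoc] at hxg ⊢
  rw [List.length_append]
  rcases List.mem_append.mp hxg with h | h
  · exact absurd h hxc
  · have := List.length_pos_of_mem h
    rw [List.length_append] at this ⊢
    omega

lemma pvSaturate_spec (n : Int) (pairs : List (Int × Int))
    (hpr : ∀ p ∈ pairs, (0 ≤ p.1 ∧ p.1 < n) ∧ (0 ≤ p.2 ∧ p.2 < n)) (start : Int) :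
    ∀ (fuel : List Int) (comp : PySem.Set Int)
      (hnd : comp.Nodup) (hr : ∀ x ∈ comp, 0 ≤ x ∧ x < n)
      (hreach : ∀ x ∈ comp, pvConn pairs start x)
      (hfuel : n.toNat < comp.length + fuel.length),
      (∀ x ∈ comp, x ∈ pvSaturate pairs fuel comp) ∧ (pvSaturate pairs fuel comp).Nodup ∧
      (∀ x ∈ pvSaturate pairs fuel comp, pvConn pairs start x) ∧
      (∀ x, x ∈ pvGrow pairs (pvSaturate pairs fuel comp) → x ∈ pvSaturate pairs fuel comp) := by
  intro fuel
  induction fuel with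
  | nil =>
    intro comp hnd hr hreach hfuel
    simp only [List.length_nil, Nat.add_zero] at hfuel
    exact absurd (pvLen_le comp n hnd hr) (by omega)
  | cons f rest ih =>
    intro comp hnd hr hreach hfuel
    show _ ∧ _
    rw [pvSaturate]
    by_cases heq : PySem.Set.equal (pvGrow pairs comp) comp = true
    · simp only [heq, if_pos]
      refine ⟨fun x hx => hx, hnd, hreach, ?_⟩
      intro x hx
      exact ((PySem.Set.equal_iff _ _).mp heq x).mp hx
    · simp only [heq, if_neg, Bool.false_eq_true, not_false_iff]
      have hgnd := pvGrow_nodup pairs comp hnd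
      have hgr : ∀ x ∈ pvGrow pairs comp, 0 ≤ x ∧ x < n := by
        intro x hx
        rcases (pvGrow_mem pairs comp x).mp hx with h | ⟨p, hp, (⟨_, hx2⟩ | ⟨_, hx2⟩)⟩
        · exact hr x h
        · exact hx2 ▸ (hpr p hp).2
        · exact hx2 ▸ (hpr p hp).1
      have hgreach : ∀ x ∈ pvGrow pairs comp, pvConn pairs start x := by
        intro x hx
        rcases (pvGrow_mem pairs comp x).mp hx with h | ⟨p, hp, (⟨hc, hx2⟩ | ⟨hc, hx2⟩)⟩
        · exact hreach x h
        · exact Relation.ReflTransGen.tail (hreach p.1 hc) (hx2 ▸ Or.inl (by simpa using hp))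
        · exact Relation.ReflTransGen.tail (hreach p.2 hc) (hx2 ▸ Or.inr (by simpa using hp))
      have hglen := pvGrow_len pairs comp heq
      have hfe : n.toNat < (pvGrow pairs comp).length + rest.length := by
        simp only [List.length_cons] at hfuel; omega
      obtain ⟨hsub, hnd', hreach', hfix⟩ := ih (pvGrow pairs comp) hgnd hgr hgreach hfe
      exact ⟨fun x hx => hsub x (pvGrow_sub pairs comp x hx), hnd', hreach', hfix⟩

lemma pvRange_len (a b : Int) : (PySem.List.pyRange a b 1).length = (b - a).toNat := by
  rw [PySem.List.pyRange_of_pos a b (by omega)]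
  by_cases h : a < b <;> simp [h] <;> omega

lemma pvSaturate_component (n : Int) (pairs : List (Int × Int))
    (hpr : ∀ p ∈ pairs, (0 ≤ p.1 ∧ p.1 < n) ∧ (0 ≤ p.2 ∧ p.2 < n))
    (start : Int) (hstart : 0 ≤ start ∧ start < n) :
    (∀ x, x ∈ pvSaturate pairs (PySem.List.pyRange 0 n 1) (PySem.Set.ofList [start]) ↔
        pvConn pairs start x) ∧
    (pvSaturate pairs (PySem.List.pyRange 0 n 1) (PySem.Set.ofList [start])).Nodup := by
  obtain ⟨hsub, hnd, hreach, hfix⟩ :=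
    pvSaturate_spec n pairs hpr start (PySem.List.pyRange 0 n 1) (PySem.Set.ofList [start])
      (PySem.Set.nodup_ofList _)
      (by intro x hx; rw [PySem.Set.mem_ofList] at hx; simp at hx; exact hx ▸ hstart)
      (by intro x hx; rw [PySem.Set.mem_ofList] at hx; simp at hx
          exact hx ▸ Relation.ReflTransGen.refl)
      (by
        rw [pvRange_len]
        have h1 : (PySem.Set.ofList [start]).length = 1 := rfl
        omega)
  refine ⟨?_, hnd⟩
  intro x
  constructor
  · exact fun hx => hreach x hx
  · intro hconn
    induction hconn with
    | refl => exact hsub start (by rw [PySem.Set.mem_ofList]; simp)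
    | @tail b c _ hbc ih =>
      refine hfix c ((pvGrow_mem pairs _ c).mpr (Or.inr ?_))
      rcases hbc with h | h
      · exact ⟨(b, c), h, Or.inl ⟨ih, rfl⟩⟩
      · exact ⟨(c, b), h, Or.inr ⟨ih, rfl⟩⟩

-- ===== outer loops =====
lemma pvSorted_eq (c₁ c₂ : List Int) (h₁ : c₁.Nodup) (h₂ : c₂.Nodup)
    (hmem : ∀ x, x ∈ c₁ ↔ x ∈ c₂) :
    PySem.List.sorted c₁ (fun x => x) = PySem.List.sorted c₂ (fun x => x) := by
  have hperm : (PySem.List.sorted c₂ (fun x => x)).Perm c₁ := by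
    refine ((PySem.List.sorted_perm c₂ (fun x => x) false).trans ?_)
    exact (List.perm_ext_iff_of_nodup h₂ h₁).mpr (fun a => (hmem a).symm)
  have hnd₂ : (PySem.List.sorted c₂ (fun x => x)).Nodup :=
    (PySem.List.sorted_perm c₂ (fun x => x) false).nodup_iff.mpr h₂
  have hpw : (PySem.List.sorted c₂ (fun x => x)).Pairwise (fun a b => a < b) := by
    have hle := PySem.List.sorted_pairwise c₂ (fun x => x)
    have := List.Pairwise.and hle (List.Pairwise.imp (fun h => h) hnd₂)
    exact this.imp (fun h => lt_of_le_of_ne h.1 h.2)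
  exact PySem.List.sorted_eq_of_perm_of_pairwise_lt c₁ _ (fun x => x) hperm hpw

lemma pvOuter_eq (n : Int) (pairs : List (Int × Int))
    (undir : PySem.Dict Int (PySem.Set Int))
    (hU : ∀ u v, v ∈ undir.getD u [] ↔ pvAdj pairs u v)
    (hu : ∀ k x, x ∈ undir.getD k [] → 0 ≤ x ∧ x < n)
    (hpr : ∀ p ∈ pairs, (0 ≤ p.1 ∧ p.1 < n) ∧ (0 ≤ p.2 ∧ p.2 < n)) :
    ∀ (starts : List Int) (hst : ∀ s ∈ starts, 0 ≤ s ∧ s < n)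
      (visited : PySem.Set Int)
      (hv : visited.Nodup ∧ ∀ x ∈ visited, 0 ≤ x ∧ x < n)
      (covered : PySem.Set Int) (comps : List (List Int))
      (hmv : ∀ x, x ∈ visited ↔ x ∈ covered)
      (hclosed : ∀ u v, u ∈ visited → pvAdj pairs u v → v ∈ visited),
      pvOuterA n undir hu starts hst visited hv comps =
        pvOuterB pairs n starts covered comps := by
  intro starts
  induction starts with
  | nil => intro hst visited hv covered comps hmv hclosed; rfl
  | cons s ss ih =>
    intro hst visited hv covered comps hmv hclosed
    rw [pvOuterA, pvOuterB]
    have hcb : visited.contains s = covered.contains s := by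
      rw [Bool.eq_iff_iff]
      constructor
      · intro h; exact (PySem.Set.contains_iff _ _).mpr
          ((hmv s).mp ((PySem.Set.contains_iff _ _).mp h))
      · intro h; exact (PySem.Set.contains_iff _ _).mpr
          ((hmv s).mpr ((PySem.Set.contains_iff _ _).mp h))
    by_cases h : PySem.Set.contains covered s = true
    · rw [hcb, h]
      simp only [if_pos]
      exact ih _ visited hv covered comps hmv hclosed
    · have h' : PySem.Set.contains covered s = false := by simpa using h
      rw [hcb, h']
      simp only [Bool.false_eq_true, if_neg, not_false_iff]
      have hsr : 0 ≤ s ∧ s < n := hst s List.mem_cons_self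
      have hnv : s ∉ visited := fun hc => h ((PySem.Set.contains_iff _ _).mpr ((hmv s).mp hc))
      obtain ⟨rmem, rnodup, rsplit⟩ :=
        pvDfs_component n pairs undir hU hu s visited hv hnv hclosed
          (pvSingletonRange n s (hst s List.mem_cons_self))
      obtain ⟨Rmem, Rnodup⟩ := pvSaturate_component n pairs hpr s hsr
      have hsin : s ∈ (pvDfs n undir hu [s] visited PySem.Set.empty
          (pvSingletonRange n s (hst s List.mem_cons_self)) hv).val.2 :=
        (rmem s).mpr Relation.ReflTransGen.refl
      have hne : ¬((pvDfs n undir hu [s] visited PySem.Set.empty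
          (pvSingletonRange n s (hst s List.mem_cons_self)) hv).val.2 = []) := by
        intro hnil; rw [hnil] at hsin; simp at hsin
      rw [if_neg hne]
      have hcs : PySem.List.sorted
          (pvDfs n undir hu [s] visited PySem.Set.empty
            (pvSingletonRange n s (hst s List.mem_cons_self)) hv).val.2 (fun x => x) =
          PySem.List.sorted
            (pvSaturate pairs (PySem.List.pyRange 0 n 1) (PySem.Set.ofList [s])) (fun x => x) :=
        pvSorted_eq _ _ rnodup Rnodup (fun x => by rw [rmem x, Rmem x])
      rw [hcs]
      refine ih _ _ _ _ _ ?_ ?_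
      · intro x
        rw [rsplit x, PySem.Set.mem_union, hmv x, rmem x, Rmem x]
      · intro u v hu' hadj
        rcases (rsplit u).mp hu' with h1 | h2
        · exact (rsplit v).mpr (Or.inl (hclosed u v h1 hadj))
        · exact (rsplit v).mpr (Or.inr ((rmem v).mpr
            (Relation.ReflTransGen.tail ((rmem u).mp h2) hadj)))

-- ===== VERDICT (by name: the statement is the Claim_ definition above) =====
theorem constraint_graph_components_py_spec : Claim_equal_constraint_graph_components_py := by
  unfold Claim_equal_constraint_graph_components_py
  intro cp n _
  unfold Spec_constraint_graph_components_py
  unfold constraint_graph_components_py constraint_graph_components_py_alt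
  simp only []
  refine congrArg (fun c => (c, (pvEdgeDicts (pvValidPairs cp n)).1.items,
    (pvEdgeDicts (pvValidPairs cp n)).2.items)) ?_ |>.symm |>.symm
  exact pvOuter_eq n (pvValidPairs cp n) (pvUndir (pvValidPairs cp n))
    (fun u v => pvUndir_mem _ u v) (pvUndir_range cp n) (pvValidPairs_range cp n)
    (PySem.List.pyRange 0 n 1) _ PySem.Set.empty _ PySem.Set.empty []
    (by simp [PySem.Set.empty]) (by simp [PySem.Set.empty])
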